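-- pv_equiv track=rewrite | github.com/catb0y/Songs-of-entities | blake.py | chunk_poems
-- ===== SOURCE A (Python) =====
-- def is_current_line_a_title(line):
--     list_of_numbers = ['I', 'II', 'III']
--     return all(word.isupper() for word in line if word not in list_of_numbers)
--
-- def chunk_poems(docu):
--     list_of_poems = []
--     current_poem = []
--
--     for listed_line in docu:
--         if is_current_line_a_title(listed_line):
--             list_of_poems.append(current_poem.copy())
--             current_poem.clear()
--
--         current_poem.extend(listed_line)
--
--     return list_of_poems
-- ===== SOURCE B (Python) =====
-- def is_current_line_a_title(line):
--     list_of_numbers = ['I', 'II', 'III']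
--     return all(word.isupper() for word in line if word not in list_of_numbers)
--
-- def chunk_poems(docu):
--     title_idx = [i for i, line in enumerate(docu) if is_current_line_a_title(line)]
--     if not title_idx:
--         return []
--     poems = []
--     for start, end in zip([0] + title_idx[:-1], title_idx):
--         poem = []
--         for line in docu[start:end]:
--             poem.extend(line)
--         poems.append(poem)
--     return poems
-- ===== Notes on version B (the rewrite author's own statement) =====
-- stated objective: alternative
-- what changed: Replaces A's single pass with a mutable copy/clear buffer by a two-pass index-table algorithm: first collect the title-line indices, then build each poem by flattening the slice of docu between consecutive title indices (with a 0-prefixed start list), which reproduces the pre-first-title poem and drops the trailing segment.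
import Mathlib
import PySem

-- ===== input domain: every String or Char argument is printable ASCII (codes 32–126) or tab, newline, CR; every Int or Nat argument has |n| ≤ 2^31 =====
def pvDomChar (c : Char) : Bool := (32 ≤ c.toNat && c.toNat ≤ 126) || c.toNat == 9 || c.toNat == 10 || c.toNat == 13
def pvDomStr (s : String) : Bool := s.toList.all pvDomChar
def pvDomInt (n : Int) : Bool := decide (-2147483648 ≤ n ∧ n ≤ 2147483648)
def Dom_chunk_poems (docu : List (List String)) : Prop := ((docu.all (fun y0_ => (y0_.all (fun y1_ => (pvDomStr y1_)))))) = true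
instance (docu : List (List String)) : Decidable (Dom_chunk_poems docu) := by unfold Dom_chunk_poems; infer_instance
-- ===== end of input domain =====

-- B replaces A's running copy/clear buffer by two passes: collect title indices, then flatten slices
-- between consecutive title indices (objective: alternative decomposition, same cost).

-- ===== PORT A =====
-- str.isupper(): at least one cased character and no lowercase one; exact on the ASCII domain,
-- where the cased characters are exactly the letters.
def pyStrIsupper (s : String) : Bool :=
  s.toList.any PySem.Chars.isalpha && s.toList.all (fun c => !PySem.Chars.islower c)

-- all(word.isupper() for word in line if word not in list_of_numbers)
def is_current_line_a_title (line : List String) : Bool :=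
  (line.filter (fun word => !(["I", "II", "III"].contains word))).all pyStrIsupper

def chunk_poems (docu : List (List String)) : List (List String) :=
  (docu.foldl
    (fun (st : List (List String) × List String) listed_line =>
      if is_current_line_a_title listed_line then
        -- append current_poem.copy(); clear; then extend with the line
        (st.1 ++ [st.2], listed_line)
      else
        (st.1, st.2 ++ listed_line))
    ([], [])).1

-- ===== PORT B =====
def chunk_poems_alt (docu : List (List String)) : List (List String) :=
  let title_idx : List Int :=
    ((PySem.List.enumerate docu).filter (fun p => is_current_line_a_title p.2)).map (·.1)
  if title_idx.isEmpty then []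
  else
    (((0 : Int) :: title_idx.dropLast).zip title_idx).map
      (fun se => (PySem.List.slice docu (some se.1) (some se.2)).foldl (fun poem line => poem ++ line) [])

-- ===== PRECONDITION & SPEC =====
def Spec_chunk_poems (docu : List (List String)) (out : List (List String)) : Prop := out = chunk_poems_alt docu
instance (docu : List (List String)) (out : List (List String)) : Decidable (Spec_chunk_poems docu out) := by unfold Spec_chunk_poems; infer_instance

-- ===== CLAIM (what is proved, stated in full; the proofs are below) =====
def Claim_equal_chunk_poems : Prop := ∀ (docu : List (List String)), Dom_chunk_poems docu → Spec_chunk_poems docu (chunk_poems docu)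

-- ===== LEMMAS AND PROOFS =====

-- Mid-level recursive characterisation of the chunking.
def splitSpec (c : List String) : List (List String) → List (List String)
  | [] => []
  | l :: ls => if is_current_line_a_title l then c :: splitSpec l ls else splitSpec (c ++ l) ls

-- Title indices, natural-number version, structural.
def tN : List (List String) → List Nat
  | [] => []
  | l :: ls => if is_current_line_a_title l then 0 :: (tN ls).map (· + 1) else (tN ls).map (· + 1)

def poemOf (docu : List (List String)) (se : Nat × Nat) : List String :=
  ((docu.drop se.1).take (se.2 - se.1)).flatten

-- A's fold in terms of splitSpec.
theorem foldA_eq (docu : List (List String)) (p : List (List String)) (c : List String) :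
    (docu.foldl
      (fun (st : List (List String) × List String) listed_line =>
        if is_current_line_a_title listed_line then
          (st.1 ++ [st.2], listed_line)
        else
          (st.1, st.2 ++ listed_line)) (p, c)).1 = p ++ splitSpec c docu := by
  induction docu generalizing p c with
  | nil => simp [splitSpec]
  | cons l ls ih =>
    rw [List.foldl_cons]
    by_cases h : is_current_line_a_title l = true
    · rw [if_pos h, ih, splitSpec, if_pos h]
      simp
    · rw [if_neg h, ih, splitSpec, if_neg h]

-- Enumerate-filter-map indices are the structural tN, shifted.
theorem tidx_enum (ls : List (List String)) (s : Int) :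
    (((PySem.List.enumerate ls s).filter (fun p => is_current_line_a_title p.2)).map (·.1))
      = (tN ls).map (fun n : Nat => s + (n : Int)) := by
  induction ls generalizing s with
  | nil => simp [PySem.List.enumerate_nil, tN]
  | cons l ls ih =>
    rw [PySem.List.enumerate_cons, tN, List.filter_cons]
    by_cases h : is_current_line_a_title l = true
    · rw [if_pos h, if_pos (by simp [h])]
      simp only [List.map_cons, ih (s + 1), List.map_map, List.cons.injEq]
      refine ⟨by omega, List.map_congr_left fun n _ => ?_⟩
      simp only [Function.comp_apply]
      push_cast
      omega
    · rw [if_neg h, if_neg (by simp [h])]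
      rw [ih (s + 1), List.map_map]
      refine List.map_congr_left fun n _ => ?_
      simp only [Function.comp_apply]
      push_cast
      omega

theorem zip_cons_dropLast {α : Type} (a b : α) (l : List α) :
    ((a :: (b :: l).dropLast).zip (b :: l)) = (a, b) :: ((b :: l.dropLast).zip l) := by
  cases l <;> simp

-- Shifting both indices by one moves the poem from (l :: ls) to ls.
theorem map_poem_shift (l : List String) (ls : List (List String)) (X Y : List Nat) :
    (((X.map (· + 1)).zip (Y.map (· + 1))).map (poemOf (l :: ls)))
      = ((X.zip Y).map (poemOf ls)) := by
  rw [List.zip_map, List.map_map]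
  apply List.map_congr_left
  intro se _
  simp [poemOf, Nat.succ_sub_succ]

-- Main characterisation: splitSpec = index-table chunking.
theorem splitSpec_eq_idx (docu : List (List String)) (c : List String) :
    splitSpec c docu =
      (match tN docu with
       | [] => []
       | t :: ts => (c ++ (docu.take t).flatten) :: ((t :: ts.dropLast).zip ts).map (poemOf docu)) := by
  induction docu generalizing c with
  | nil => simp [splitSpec, tN]
  | cons l ls ih =>
    by_cases h : is_current_line_a_title l = true
    · have hsp : splitSpec c (l :: ls) = c :: splitSpec l ls := by rw [splitSpec, if_pos h]
      have htN : tN (l :: ls) = 0 :: (tN ls).map (· + 1) := by rw [tN, if_pos h]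
      rw [hsp, htN, ih l]
      rcases hts : tN ls with _ | ⟨t', ts'⟩
      · simp
      · simp only [List.map_cons]
        rw [zip_cons_dropLast]
        simp only [List.map_cons]
        refine congrArg₂ _ (by simp) (congrArg₂ _ ?_ ?_)
        · simp [poemOf, List.take_succ_cons]
        · rw [show ((t' + 1) :: (ts'.map (· + 1)).dropLast) = ((t' :: ts'.dropLast).map (· + 1)) by
              simp [List.map_dropLast]]
          rw [map_poem_shift l ls]
    · have hsp : splitSpec c (l :: ls) = splitSpec (c ++ l) ls := by rw [splitSpec, if_neg h]
      have htN : tN (l :: ls) = (tN ls).map (· + 1) := by rw [tN, if_neg h]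
      rw [hsp, htN, ih (c ++ l)]
      rcases hts : tN ls with _ | ⟨t', ts'⟩
      · simp
      · simp only [List.map_cons]
        refine congrArg₂ _ ?_ ?_
        · simp [List.take_succ_cons, List.append_assoc]
        · rw [show ((t' + 1) :: (ts'.map (· + 1)).dropLast) = ((t' :: ts'.dropLast).map (· + 1)) by
              simp [List.map_dropLast]]
          rw [map_poem_shift l ls]

-- B in terms of tN / poemOf.
theorem altB_eq (docu : List (List String)) :
    chunk_poems_alt docu =
      (match tN docu with
       | [] => []
       | t :: ts => ((0 :: (t :: ts).dropLast).zip (t :: ts)).map (poemOf docu)) := by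
  unfold chunk_poems_alt
  rw [tidx_enum docu 0]
  simp only [zero_add]
  rcases hts : tN docu with _ | ⟨t, ts⟩
  · simp
  · simp only [List.map_cons, List.isEmpty_cons, if_false, Bool.false_eq_true]
    rw [show ((0 : Int) :: ((t : Int) :: ts.map (fun n : Nat => (n : Int))).dropLast)
          = ((0 :: (t :: ts).dropLast).map (fun n : Nat => (n : Int))) by
        simp [List.map_dropLast]]
    rw [show ((t : Int) :: ts.map (fun n : Nat => (n : Int)))
          = ((t :: ts).map (fun n : Nat => (n : Int))) by simp]
    rw [List.zip_map, List.map_map]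
    apply List.map_congr_left
    intro se _
    simp only [Function.comp, Prod.map]
    rw [PySem.List.slice_natCast]
    rw [PySem.List.foldl_append_eq_flatten]
    simp [poemOf]

-- ===== VERDICT (by name: the statement is the Claim_ definition above) =====
theorem chunk_poems_spec : Claim_equal_chunk_poems := by
  intro docu _
  unfold Spec_chunk_poems chunk_poems
  rw [foldA_eq, altB_eq, splitSpec_eq_idx]
  rcases hts : tN docu with _ | ⟨t, ts⟩
  · simp
  · dsimp only
    simp only [List.nil_append]
    rw [zip_cons_dropLast]
    simp only [List.map_cons]
    refine congrArg₂ _ ?_ rfl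
    simp [poemOf]
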